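-- pv_equiv track=rewrite | github.com/TomaszekCM/Advent_of_code_2020 | day12.py | moving_the_ship
-- ===== SOURCE A (Python) =====
-- def moving_the_ship(waypoint, multiplier):
--     distance_in_east = 0
--     distance_in_north = 0
--     for i in waypoint:
--         if i[0] == "N":
--             distance_in_north += (multiplier*i[1])
--         elif i[0] == "S":
--             distance_in_north -= (multiplier*i[1])
--         elif i[0] == "E":
--             distance_in_east += (multiplier* i[1])
--         elif i[0] == "W":
--             distance_in_east -= (multiplier* i[1])
--
--     return distance_in_east, distance_in_north
-- ===== SOURCE B (Python) =====
-- def moving_the_ship(waypoint, multiplier):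
--     north = multiplier * sum(x for d, x in waypoint if d == "N") \
--           - multiplier * sum(x for d, x in waypoint if d == "S")
--     east = multiplier * sum(x for d, x in waypoint if d == "E") \
--          - multiplier * sum(x for d, x in waypoint if d == "W")
--     return east, north
-- ===== Notes on version B (the rewrite author's own statement) =====
-- stated objective: simpler
-- what changed: Replaces the single mutable-accumulator if/elif pass with per-direction filtered summations combined by a closed-form linear expression per coordinate.
import Mathlib
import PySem

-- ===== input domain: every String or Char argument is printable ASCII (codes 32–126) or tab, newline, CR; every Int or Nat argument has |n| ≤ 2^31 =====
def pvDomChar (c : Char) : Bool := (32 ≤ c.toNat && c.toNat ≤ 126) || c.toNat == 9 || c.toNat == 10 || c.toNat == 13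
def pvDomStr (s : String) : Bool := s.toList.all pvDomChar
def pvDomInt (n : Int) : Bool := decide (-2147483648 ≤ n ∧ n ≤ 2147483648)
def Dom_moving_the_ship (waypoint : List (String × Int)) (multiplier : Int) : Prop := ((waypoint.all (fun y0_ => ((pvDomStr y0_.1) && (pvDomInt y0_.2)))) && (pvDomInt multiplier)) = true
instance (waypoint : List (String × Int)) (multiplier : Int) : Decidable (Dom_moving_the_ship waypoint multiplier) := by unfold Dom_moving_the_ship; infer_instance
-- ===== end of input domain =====

-- B replaces A's single mutable-accumulator if/elif pass with per-direction filtered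
-- summations combined linearly per coordinate (objective: simpler).

-- ===== PORT A =====
-- single pass, state (east, north), branch order as in A
def moving_the_ship (waypoint : List (String × Int)) (multiplier : Int) : Int × Int :=
  let st := waypoint.foldl (fun (acc : Int × Int) i =>
    if i.1 = "N" then (acc.1, acc.2 + multiplier * i.2)
    else if i.1 = "S" then (acc.1, acc.2 - multiplier * i.2)
    else if i.1 = "E" then (acc.1 + multiplier * i.2, acc.2)
    else if i.1 = "W" then (acc.1 - multiplier * i.2, acc.2)
    else acc) (0, 0)
  (st.1, st.2)

-- ===== PORT B =====
-- sum of x over pairs whose direction equals d (the filtered generator-sum in Source B)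
def mts_dirSum (waypoint : List (String × Int)) (d : String) : Int :=
  ((waypoint.filter (fun p => p.1 = d)).map (fun p => p.2)).sum

def moving_the_ship_alt (waypoint : List (String × Int)) (multiplier : Int) : Int × Int :=
  let north := multiplier * mts_dirSum waypoint "N" - multiplier * mts_dirSum waypoint "S"
  let east  := multiplier * mts_dirSum waypoint "E" - multiplier * mts_dirSum waypoint "W"
  (east, north)

-- ===== PRECONDITION & SPEC =====
def Spec_moving_the_ship (waypoint : List (String × Int)) (multiplier : Int) (out : Int × Int) : Prop := out = moving_the_ship_alt waypoint multiplier
instance (waypoint : List (String × Int)) (multiplier : Int) (out : Int × Int) : Decidable (Spec_moving_the_ship waypoint multiplier out) := by unfold Spec_moving_the_ship; infer_instance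

-- ===== CLAIM (what is proved, stated in full; the proofs are below) =====
def Claim_equal_moving_the_ship : Prop := ∀ (waypoint : List (String × Int)) (multiplier : Int), Dom_moving_the_ship waypoint multiplier → Spec_moving_the_ship waypoint multiplier (moving_the_ship waypoint multiplier)

-- ===== LEMMAS AND PROOFS =====
theorem mts_foldl_inv (waypoint : List (String × Int)) (multiplier : Int) (e n : Int) :
    waypoint.foldl (fun (acc : Int × Int) i =>
      if i.1 = "N" then (acc.1, acc.2 + multiplier * i.2)
      else if i.1 = "S" then (acc.1, acc.2 - multiplier * i.2)
      else if i.1 = "E" then (acc.1 + multiplier * i.2, acc.2)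
      else if i.1 = "W" then (acc.1 - multiplier * i.2, acc.2)
      else acc) (e, n)
    = (e + multiplier * mts_dirSum waypoint "E" - multiplier * mts_dirSum waypoint "W",
       n + multiplier * mts_dirSum waypoint "N" - multiplier * mts_dirSum waypoint "S") := by
  induction waypoint generalizing e n with
  | nil => simp [mts_dirSum]
  | cons p t ih =>
      simp only [List.foldl_cons]
      split_ifs with h1 h2 h3 h4 <;>
        simp [ih, mts_dirSum, List.filter_cons, h1] <;>
        simp_all [mts_dirSum] <;> ring

-- ===== VERDICT (by name: the statement is the Claim_ definition above) =====
theorem moving_the_ship_spec : Claim_equal_moving_the_ship := by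
  intro waypoint multiplier _
  unfold Spec_moving_the_ship moving_the_ship moving_the_ship_alt
  simp [mts_foldl_inv]
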